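-- pv_equiv track=rewrite | github.com/gnjardim/prog1_puc-rio | Aulas/code/P2/SimLivros/sim_livros.py | menor_quantidade
-- ===== SOURCE A (Python) =====
-- def menor_quantidade(l):
--     by_dist = list()
--
--     for livro in l:
--         for (i, el) in enumerate(livro[1]):
--             if i >= len(by_dist):
--                 by_dist.append(el)
--
--             else:
--                 by_dist[i] += el
--
--     menor = by_dist[0]
--     cod = 1
--     for (i, dist) in enumerate(by_dist[1:]):
--         if dist < menor:
--             menor = dist
--             cod = i+2
--
--     return cod
-- ===== SOURCE B (Python) =====
-- def menor_quantidade(l):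
--     dists = [livro[1] for livro in l]
--     width = max((len(d) for d in dists), default=0)
--     by_dist = [sum(d[j] for d in dists if j < len(d)) for j in range(width)]
--     return min(range(1, width + 1), key=lambda c: by_dist[c - 1])
-- ===== Notes on version B (the rewrite author's own statement) =====
-- stated objective: simpler
-- what changed: Replaces A's row-major grow-or-add accumulation (per-element append/in-place-update branch) and its explicit menor/cod scan loop with a column-major transpose: per-column sums over range(width), then min over the 1-based index range with a key.
import Mathlib
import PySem

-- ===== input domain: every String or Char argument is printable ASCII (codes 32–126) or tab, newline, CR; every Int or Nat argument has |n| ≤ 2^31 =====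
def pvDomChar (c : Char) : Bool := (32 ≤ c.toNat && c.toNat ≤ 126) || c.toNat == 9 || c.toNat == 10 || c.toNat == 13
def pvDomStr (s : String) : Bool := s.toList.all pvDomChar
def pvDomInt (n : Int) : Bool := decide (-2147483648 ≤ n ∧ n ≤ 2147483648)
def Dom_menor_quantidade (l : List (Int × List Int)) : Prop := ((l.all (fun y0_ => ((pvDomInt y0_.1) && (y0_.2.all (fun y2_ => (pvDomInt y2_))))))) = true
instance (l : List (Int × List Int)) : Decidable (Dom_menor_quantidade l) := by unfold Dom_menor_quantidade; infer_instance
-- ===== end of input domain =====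

-- B replaces A's row-major grow-or-add accumulation and explicit menor/cod scan with a
-- column-major transpose (per-column sums) followed by min-with-key over the index range (simpler).

-- ===== PORT A =====
-- inner loop body: 'if i >= len(by_dist): by_dist.append(el) else: by_dist[i] += el'
def pvAStep (bd : List Int) (ie : Int × Int) : List Int :=
  if (bd.length : Int) ≤ ie.1 then bd ++ [ie.2]
  else PySem.List.pySetD bd ie.1 (PySem.List.pyGetD bd ie.1 0 + ie.2)

-- 'for (i, el) in enumerate(livro[1]): …'
def pvARow (bd row : List Int) : List Int :=
  (PySem.List.enumerate row).foldl pvAStep bd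

-- min-scan body: 'if dist < menor: menor = dist; cod = i+2'
def pvAMin (mc : Int × Int) (id : Int × Int) : Int × Int :=
  if id.2 < mc.1 then (id.2, id.1 + 2) else mc

def menor_quantidade (l : List (Int × List Int)) : Int :=
  let by_dist := l.foldl (fun bd livro => pvARow bd livro.2) []
  -- by_dist[0]: IndexError on empty by_dist — those inputs are excluded by Pre_
  let menor := PySem.List.pyGetD by_dist 0 0
  ((PySem.List.enumerate (PySem.List.slice by_dist (some 1) none)).foldl pvAMin (menor, 1)).2

-- ===== PORT B =====
-- key c ↦ by_dist[c - 1]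
def pvBKey (by_dist : List Int) (c : Int) : Int := PySem.List.pyGetD by_dist (c - 1) 0

def menor_quantidade_alt (l : List (Int × List Int)) : Int :=
  let dists := l.map (fun livro => livro.2)
  -- max((len(d) for d in dists), default=0): running max, exact since all lengths and the default are ≥ 0
  let width := dists.foldl (fun w d => max w d.length) 0
  -- [sum(d[j] for d in dists if j < len(d)) for j in range(width)]; range(width) over Nat is exact (width ≥ 0)
  let by_dist := (List.range width).map (fun j =>
    ((dists.filter (fun d => decide (j < d.length))).map (fun d => d.getD j 0)).sum)
  -- min(range(1, width+1), key=…): ValueError on the empty range — excluded by Pre_, .getD 0 unreachable there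
  (PySem.List.min? (PySem.List.pyRange 1 ((width : Int) + 1) 1) (pvBKey by_dist)).getD 0

-- ===== PRECONDITION & SPEC =====
-- Pre_ excludes exactly the inputs where every book's distribution list is empty: there A raises
-- IndexError on by_dist[0] (and B raises ValueError on min of an empty range).
def Pre_menor_quantidade (l : List (Int × List Int)) : Prop :=
  (l.any (fun p => !p.2.isEmpty)) = true
instance (l : List (Int × List Int)) : Decidable (Pre_menor_quantidade l) := by
  unfold Pre_menor_quantidade; infer_instance

def pvWitness_menor_quantidade : (List (Int × List Int)) := [(1, [3, 2]), (2, [1, 5, 4])]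

def Spec_menor_quantidade (l : List (Int × List Int)) (out : Int) : Prop := out = menor_quantidade_alt l
instance (l : List (Int × List Int)) (out : Int) : Decidable (Spec_menor_quantidade l out) := by unfold Spec_menor_quantidade; infer_instance

-- ===== CLAIM (what is proved, stated in full; the proofs are below) =====
def Claim_equal_menor_quantidade : Prop := ∀ (l : List (Int × List Int)), Dom_menor_quantidade l → Pre_menor_quantidade l → Spec_menor_quantidade l (menor_quantidade l)

-- ===== LEMMAS AND PROOFS =====

-- elementwise sum of two rows, the longer one's tail kept (what A's inner loop computes)
def padAdd : List Int → List Int → List Int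
  | bd, [] => bd
  | [], e :: r => e :: padAdd [] r
  | a :: bd, e :: r => (a + e) :: padAdd bd r

theorem padAdd_nil_left (r : List Int) : padAdd [] r = r := by
  induction r with
  | nil => rfl
  | cons e r ih => simp [padAdd, ih]

theorem padAdd_length (a b : List Int) : (padAdd a b).length = max a.length b.length := by
  induction b generalizing a with
  | nil => simp [padAdd]
  | cons e r ih =>
    cases a <;> simp [padAdd, ih]

theorem padAdd_getD (a b : List Int) (j : Nat) :
    (padAdd a b).getD j 0 = a.getD j 0 + b.getD j 0 := by
  induction b generalizing a j with
  | nil => simp [padAdd]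
  | cons e r ih =>
    cases a with
    | nil =>
      cases j with
      | zero => simp [padAdd]
      | succ j => simpa [padAdd] using ih [] j
    | cons x t =>
      cases j with
      | zero => simp [padAdd]
      | succ j => simpa [padAdd] using ih t j

theorem inner_gen (row : List Int) : ∀ (bd : List Int) (k : Nat), k ≤ bd.length →
    (PySem.List.enumerate row (k : Int)).foldl pvAStep bd
      = bd.take k ++ padAdd (bd.drop k) row := by
  induction row with
  | nil => intro bd k hk; simp [PySem.List.enumerate, padAdd]
  | cons e r ih =>
    intro bd k hk
    rw [PySem.List.enumerate_cons, List.foldl_cons]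
    by_cases hke : bd.length = k
    · have hstep : pvAStep bd ((k : Int), e) = bd ++ [e] := by
        simp [pvAStep, hke]
      rw [hstep]
      have hcast : ((k : Int) + 1) = ((k + 1 : Nat) : Int) := by push_cast; ring
      rw [hcast, ih (bd ++ [e]) (k + 1) (by simp; omega)]
      have h1 : (bd ++ [e]).take (k + 1) = bd ++ [e] := by
        apply List.take_of_length_le; simp; omega
      have h2 : (bd ++ [e]).drop (k + 1) = [] := by
        apply List.drop_of_length_le; simp; omega
      have h3 : bd.take k = bd := List.take_of_length_le (by omega)
      have h4 : bd.drop k = [] := List.drop_of_length_le (by omega)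
      rw [h1, h2, h3, h4]
      simp [padAdd, padAdd_nil_left]
  
    · have hk' : k < bd.length := by omega
      have hstep : pvAStep bd ((k : Int), e) = bd.set k (bd.getD k 0 + e) := by
        rw [pvAStep, if_neg (by push_cast; omega)]
        simp [PySem.List.pySetD, PySem.List.pySet?_natCast bd k _ hk']
      rw [hstep]
      have hcast : ((k : Int) + 1) = ((k + 1 : Nat) : Int) := by push_cast; ring
      rw [hcast, ih _ (k + 1) (by simp; omega)]
      have hset : bd.set k (bd.getD k 0 + e) = bd.take k ++ (bd[k] + e) :: bd.drop (k + 1) := by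
        rw [List.getD_eq_getElem bd 0 hk', List.set_eq_take_append_cons_drop, if_pos hk']
      rw [hset]
      have hlt : (bd.take k).length = k := by simp; omega
      have h1 : (bd.take k ++ (bd[k] + e) :: bd.drop (k + 1)).take (k + 1)
          = bd.take k ++ [bd[k] + e] := by
        rw [List.take_append]
        simp [hlt]
      have h2 : (bd.take k ++ (bd[k] + e) :: bd.drop (k + 1)).drop (k + 1)
          = bd.drop (k + 1) := by
        rw [List.drop_append]
        simp [hlt]
      rw [h1, h2]
      have hdk : bd.drop k = bd[k] :: bd.drop (k + 1) := List.drop_eq_getElem_cons hk'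
      rw [hdk]
      simp [padAdd]

theorem pvARow_eq (bd row : List Int) : pvARow bd row = padAdd bd row := by
  have := inner_gen row bd 0 (by omega)
  simpa [pvARow] using this

theorem outer_len (l : List (Int × List Int)) : ∀ (acc : List Int),
    (l.foldl (fun bd livro => pvARow bd livro.2) acc).length
      = l.foldl (fun w p => max w p.2.length) acc.length := by
  induction l with
  | nil => intro acc; rfl
  | cons p t ih =>
    intro acc
    simp only [List.foldl_cons]
    rw [ih, pvARow_eq, padAdd_length]

theorem outer_getD (l : List (Int × List Int)) : ∀ (acc : List Int) (j : Nat),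
    (l.foldl (fun bd livro => pvARow bd livro.2) acc).getD j 0
      = acc.getD j 0 + (l.map (fun p => p.2.getD j 0)).sum := by
  induction l with
  | nil => intro acc j; simp
  | cons p t ih =>
    intro acc j
    simp only [List.foldl_cons, List.map_cons, List.sum_cons]
    rw [ih, pvARow_eq, padAdd_getD]
    ring

theorem filter_sum_eq (dists : List (List Int)) (j : Nat) :
    ((dists.filter (fun d => decide (j < d.length))).map (fun d => d.getD j 0)).sum
      = (dists.map (fun d => d.getD j 0)).sum := by
  induction dists with
  | nil => rfl
  | cons d t ih =>
    by_cases h : j < d.length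
    · rw [List.filter_cons, if_pos (by simpa using h)]
      simp only [List.map_cons, List.sum_cons, ih]
    · have h0 : d.getD j 0 = 0 := List.getD_eq_default _ _ (by omega)
      rw [List.filter_cons, if_neg (by simpa using h)]
      simp only [List.map_cons, List.sum_cons, ih, h0, zero_add]

theorem le_foldl_max (xs : List (List Int)) : ∀ (a : Nat),
    a ≤ xs.foldl (fun w d => max w d.length) a := by
  induction xs with
  | nil => intro a; simp
  | cons d t ih =>
    intro a
    calc a ≤ max a d.length := le_max_left _ _
    _ ≤ t.foldl (fun w d => max w d.length) (max a d.length) := ih _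

theorem mem_le_foldl_max (xs : List (List Int)) : ∀ (a : Nat) (d : List Int), d ∈ xs →
    d.length ≤ xs.foldl (fun w d => max w d.length) a := by
  induction xs with
  | nil => intro a d h; simp at h
  | cons x t ih =>
    intro a d h
    rcases List.mem_cons.mp h with h | h
    · subst h
      calc d.length ≤ max a d.length := le_max_right _ _
      _ ≤ _ := le_foldl_max t _
    · exact ih _ d h

-- the min-scan alignment: A's (menor, cod) fold over enumerate(bd[1:]) vs B's min-with-key fold
theorem scan_gen (bd : List Int) : ∀ (t : List Int) (k : Nat) (c m : Int),
    t = bd.drop (k + 1) → m = pvBKey bd c →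
    ((PySem.List.enumerate t (k : Int)).foldl pvAMin (m, c)).2
      = (List.foldl (fun acc x => match acc with
            | none => some x
            | some mm => if pvBKey bd x < pvBKey bd mm then some x else some mm)
          (some c) (PySem.List.pyRange ((k : Int) + 2) ((bd.length : Int) + 1) 1)).getD 0 := by
  intro t
  induction t with
  | nil =>
    intro k c m ht hm
    have hlen : bd.length ≤ k + 1 := by
      by_contra h
      have : bd.drop (k + 1) ≠ [] := by
        simp [List.drop_eq_nil_iff]; omega
      exact this ht.symm
    rw [PySem.List.pyRange_one_eq_nil (by omega)]
    simp [PySem.List.enumerate]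
  | cons e t' ih =>
    intro k c m ht hm
    have hk1 : k + 1 < bd.length := by
      by_contra h
      rw [List.drop_of_length_le (by omega)] at ht
      simp at ht
    have hdk : bd.drop (k + 1) = bd[k + 1] :: bd.drop (k + 2) := List.drop_eq_getElem_cons hk1
    rw [hdk] at ht
    obtain ⟨he, ht'⟩ : e = bd[k + 1] ∧ t' = bd.drop (k + 2) := by
      constructor <;> [exact (List.cons.injEq _ _ _ _ ▸ ht).1; exact (List.cons.injEq _ _ _ _ ▸ ht).2]
    rw [PySem.List.enumerate_cons, List.foldl_cons]
    rw [PySem.List.pyRange_one_cons (by omega), List.foldl_cons]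
    have hkey : pvBKey bd ((k : Int) + 2) = e := by
      have : ((k : Int) + 2) - 1 = ((k + 1 : Nat) : Int) := by push_cast; ring
      rw [pvBKey, this, PySem.List.pyGetD_natCast, List.getD_eq_getElem bd 0 hk1, he]
    have hcast : ((k : Int) + 1) = ((k + 1 : Nat) : Int) := by push_cast; ring
    by_cases hcmp : e < m
    · have hA : pvAMin (m, c) ((k : Int), e) = (e, (k : Int) + 2) := by
        simp [pvAMin, hcmp]
      rw [hA]
      have hB : (if pvBKey bd ((k : Int) + 2) < pvBKey bd c then some ((k : Int) + 2) else some c)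
          = some ((k : Int) + 2) := by
        rw [hkey, ← hm]; simp [hcmp]
      simp only [hkey, ← hm]
      rw [if_pos hcmp]
      have := ih (k + 1) ((k : Int) + 2) e ht' hkey.symm
      convert this using 3
    · have hA : pvAMin (m, c) ((k : Int), e) = (m, c) := by
        simp [pvAMin, hcmp]
      rw [hA]
      simp only [hkey, ← hm]
      rw [if_neg hcmp]
      have := ih (k + 1) c m ht' hm
      convert this using 3

-- ===== VERDICT (by name: the statement is the Claim_ definition above) =====
theorem menor_quantidade_spec : Claim_equal_menor_quantidade := by
  intro l _hdom hpre
  simp only [Spec_menor_quantidade, menor_quantidade, menor_quantidade_alt]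
  set dists := l.map (fun livro => livro.2) with hdists
  set w := dists.foldl (fun w d => max w d.length) 0 with hw
  set Abd := l.foldl (fun bd livro => pvARow bd livro.2) [] with hAbd
  set Bbd := (List.range w).map (fun j =>
    ((dists.filter (fun d => decide (j < d.length))).map (fun d => d.getD j 0)).sum) with hBbd
  have hwl : w = l.foldl (fun acc p => max acc p.2.length) 0 := by
    rw [hw, hdists, List.foldl_map]
  have hlen : Abd.length = w := by rw [hAbd, outer_len l [], hwl]; rfl
  have hget : ∀ j : Nat, Abd.getD j 0 = (l.map (fun p => p.2.getD j 0)).sum := by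
    intro j; rw [hAbd, outer_getD l [] j]; simp
  have hbd : Bbd = Abd := by
    apply List.ext_getElem
    · rw [hBbd]; simp [hlen]
    · intro j h1 h2
      simp only [hBbd, List.getElem_map, List.getElem_range]
      rw [filter_sum_eq dists j, hdists, List.map_map]
      rw [← List.getD_eq_getElem Abd 0 h2, hget j]
      rfl
  have hw1 : 1 ≤ w := by
    rw [Pre_menor_quantidade, List.any_eq_true] at hpre
    obtain ⟨p, hpl, hne⟩ := hpre
    have hmem : p.2 ∈ dists := by rw [hdists]; exact List.mem_map_of_mem hpl
    have h2 := mem_le_foldl_max dists 0 p.2 hmem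
    rw [← hw] at h2
    have h3 : 1 ≤ p.2.length := by
      cases hp2 : p.2 with
      | nil => rw [hp2] at hne; simp at hne
      | cons x t => simp
    omega
  have hslice : PySem.List.slice Abd (some 1) none = Abd.drop 1 := by
    rw [PySem.List.slice_from_one, List.drop_one]
  have hm : PySem.List.pyGetD Abd 0 0 = pvBKey Abd 1 := by rw [pvBKey]; norm_num
  have hL := scan_gen Abd (Abd.drop 1) 0 (1 : Int) (PySem.List.pyGetD Abd 0 0) (by simp) hm
  push_cast at hL
  have hmin : ∀ (ys : List Int), PySem.List.min? ys (pvBKey Abd)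
      = List.foldl (fun acc x => match acc with
          | none => some x
          | some mm => if pvBKey Abd x < pvBKey Abd mm then some x else some mm) none ys := by
    intro ys
    rw [PySem.List.min?]
    congr 1
    funext acc x
    cases acc <;> rfl
  rw [hslice, hL, hbd, ← hlen, hmin]
  conv_rhs => rw [PySem.List.pyRange_one_cons (show (1 : Int) < (Abd.length : Int) + 1 by omega),
    List.foldl_cons]
  norm_num
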